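-- pv_equiv track=rewrite | github.com/FAIRmat-NFDI/pynxtools-em | pynxtools_em/concepts/mapping_functors.py | variadic_path_to_specific_path
-- ===== SOURCE A (Python) =====
-- def variadic_path_to_specific_path(path: str, instance_identifier: list):
--     """Transforms a variadic path to an actual path with instances."""
--     if (path is not None) and (path != ""):
--         narguments = path.count("*")
--         if narguments == 0:  # path is not variadic
--             return path
--         if len(instance_identifier) >= narguments:
--             tmp = path.split("*")
--             if len(tmp) == narguments + 1:
--                 nx_specific_path = ""
--                 for idx in range(0, narguments):
--                     nx_specific_path += f"{tmp[idx]}{instance_identifier[idx]}"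
--                     idx += 1
--                 nx_specific_path += f"{tmp[-1]}"
--                 return nx_specific_path
--     return None
-- ===== SOURCE B (Python) =====
-- def variadic_path_to_specific_path(path: str, instance_identifier: list):
--     """Transforms a variadic path to an actual path with instances."""
--     if not path:
--         return None
--     narguments = path.count("*")
--     if narguments == 0:
--         return path
--     if len(instance_identifier) < narguments:
--         return None
--     it = iter(instance_identifier)
--     return "".join(f"{next(it)}" if c == "*" else c for c in path)
-- ===== Notes on version B (the rewrite author's own statement) =====
-- stated objective: idiomatic
-- what changed: A splits the path on '*' and rebuilds it by indexing pre-split segments and identifiers in a counted loop; B makes a single left-to-right pass over the path's characters, substituting each '*' with the next identifier drawn from an iterator (no split, no indexing).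
import Mathlib
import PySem

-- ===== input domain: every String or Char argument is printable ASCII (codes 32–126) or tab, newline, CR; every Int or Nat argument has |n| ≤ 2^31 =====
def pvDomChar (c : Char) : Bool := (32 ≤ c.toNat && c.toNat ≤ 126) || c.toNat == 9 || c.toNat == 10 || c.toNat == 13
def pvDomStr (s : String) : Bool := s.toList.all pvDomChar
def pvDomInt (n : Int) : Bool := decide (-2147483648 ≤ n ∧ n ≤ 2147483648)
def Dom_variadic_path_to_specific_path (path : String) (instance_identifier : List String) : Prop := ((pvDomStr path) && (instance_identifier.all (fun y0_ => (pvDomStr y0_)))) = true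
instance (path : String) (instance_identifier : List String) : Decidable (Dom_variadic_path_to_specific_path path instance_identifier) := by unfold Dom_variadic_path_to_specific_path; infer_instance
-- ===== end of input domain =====

-- B replaces A's split-on-'*'-and-index-interleave loop with a single character scan that
-- substitutes each '*' with the next identifier from the list; equivalence on all inputs (A is total).

-- ===== PORT A =====
-- A works on path.split("*"): ported via PySem.Chars.splitOn on path.toList (the list-of-chars
-- side, exact for Python split with a non-empty separator); `for idx in range(0, narguments)`
-- is a foldl over PySem.List.pyRange 0 narguments; tmp[idx], instance_identifier[idx] and
-- tmp[-1] are PySem.List.pyGetD (every index is in range here, so the default is never taken).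
def variadic_path_to_specific_path (path : String) (instance_identifier : List String) : Option String :=
  if path ≠ "" then
    let narguments := PySem.Str.count path "*"
    if narguments = 0 then some path
    else if instance_identifier.length ≥ narguments then
      let tmp := PySem.Chars.splitOn path.toList ['*']
      if tmp.length = narguments + 1 then
        let nx_specific_path :=
          (PySem.List.pyRange 0 (narguments : Int)).foldl
            (fun acc idx =>
              acc ++ PySem.List.pyGetD tmp idx [] ++ (PySem.List.pyGetD instance_identifier idx "").toList)
            ([] : List Char)
        some (String.ofList (nx_specific_path ++ PySem.List.pyGetD tmp (-1) []))
      else none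
    else none
  else none

-- ===== PORT B =====
-- B's generator `next(it) if c == "*" else c for c in path` with `it = iter(instance_identifier)`:
-- a structural scan over the characters, consuming the identifier list head-first.
def pvSubstChars : List Char → List String → List Char
  | [], _ => []
  | c :: cs, ids =>
      if c = '*' then (ids.headD "").toList ++ pvSubstChars cs ids.tail
      else c :: pvSubstChars cs ids

def variadic_path_to_specific_path_alt (path : String) (instance_identifier : List String) : Option String :=
  if path = "" then none
  else
    let narguments := PySem.Str.count path "*"
    if narguments = 0 then some path
    else if instance_identifier.length < narguments then none
    else some (String.ofList (pvSubstChars path.toList instance_identifier))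

-- ===== PRECONDITION & SPEC =====
def Spec_variadic_path_to_specific_path (path : String) (instance_identifier : List String) (out : Option String) : Prop := out = variadic_path_to_specific_path_alt path instance_identifier
instance (path : String) (instance_identifier : List String) (out : Option String) : Decidable (Spec_variadic_path_to_specific_path path instance_identifier out) := by unfold Spec_variadic_path_to_specific_path; infer_instance

-- ===== CLAIM (what is proved, stated in full; the proofs are below) =====
def Claim_equal_variadic_path_to_specific_path : Prop := ∀ (path : String) (instance_identifier : List String), Dom_variadic_path_to_specific_path path instance_identifier → Spec_variadic_path_to_specific_path path instance_identifier (variadic_path_to_specific_path path instance_identifier)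

-- ===== LEMMAS AND PROOFS =====

-- reference form of path.split("*"), used only inside the proofs
def pvSplitStar : List Char → List (List Char)
  | [] => [[]]
  | c :: cs =>
      if c = '*' then [] :: pvSplitStar cs
      else match pvSplitStar cs with
        | [] => [[c]]
        | p :: ps => (c :: p) :: ps

lemma pvSplitStar_ne_nil (l : List Char) : pvSplitStar l ≠ [] := by
  cases l with
  | nil => simp [pvSplitStar]
  | cons c cs =>
      simp only [pvSplitStar]
      split_ifs
      · simp
      · cases h : pvSplitStar cs <;> simp

lemma pvSplitStar_length (l : List Char) : (pvSplitStar l).length = l.count '*' + 1 := by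
  induction l with
  | nil => simp [pvSplitStar]
  | cons c cs ih =>
      simp only [pvSplitStar]
      by_cases hc : c = '*'
      · simp [hc, ih]
      · cases h : pvSplitStar cs with
        | nil => exact absurd h (pvSplitStar_ne_nil cs)
        | cons p ps =>
            simp [hc, ← ih, h]

lemma pvCountGo (l : List Char) : ∀ (fuel acc : Nat), l.length ≤ fuel →
    PySem.Chars.count.go ['*'] fuel l acc = acc + l.count '*' := by
  induction l with
  | nil => intro fuel acc _; cases fuel <;> simp [PySem.Chars.count.go]
  | cons c cs ih =>
      intro fuel acc hf
      cases fuel with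
      | zero => simp at hf
      | succ f =>
          rw [PySem.Chars.count.go]
          by_cases hc : c = '*'
          · simp only [hc, List.isPrefixOf, BEq.rfl, Bool.true_and,
              if_pos, List.length_cons, List.length_nil, List.drop_succ_cons, List.drop_zero]
            rw [ih f (acc + 1) (by simpa using hf)]
            simp
            omega
          · have : (['*'].isPrefixOf (c :: cs)) = false := by
              simp [List.isPrefixOf]
              exact fun h => absurd h.symm hc
            simp only [this, Bool.false_eq_true, if_neg, not_false_iff]
            rw [ih f acc (by simpa using hf)]
            simp [hc]

lemma pvCountStar (l : List Char) : PySem.Chars.count l ['*'] = l.count '*' := by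
  rw [PySem.Chars.count]
  simp only [show (['*'] : List Char).isEmpty = false from rfl, Bool.false_eq_true, if_false]
  simpa using pvCountGo l l.length 0 (le_refl _)

lemma pvSplitGo (l : List Char) : ∀ (fuel : Nat) (cur : List Char) (acc : List (List Char)),
    l.length ≤ fuel →
    PySem.Chars.splitOn.go ['*'] fuel l cur acc =
      acc.reverse ++ (match pvSplitStar l with
        | [] => []
        | p :: ps => (cur.reverse ++ p) :: ps) := by
  induction l with
  | nil =>
      intro fuel cur acc _
      cases fuel <;> simp [PySem.Chars.splitOn.go, pvSplitStar]
  | cons c cs ih =>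
      intro fuel cur acc hf
      cases fuel with
      | zero => simp at hf
      | succ f =>
          rw [PySem.Chars.splitOn.go]
          by_cases hc : c = '*'
          · simp only [hc, List.isPrefixOf, BEq.rfl, Bool.true_and,
              if_pos, List.length_cons, List.length_nil, List.drop_succ_cons, List.drop_zero]
            rw [ih f [] (cur.reverse :: acc) (by simpa using hf)]
            cases h : pvSplitStar cs with
            | nil => exact absurd h (pvSplitStar_ne_nil cs)
            | cons p ps => simp [pvSplitStar, h]
          · have hpre : (['*'].isPrefixOf (c :: cs)) = false := by
              simp [List.isPrefixOf]
              exact fun h => absurd h.symm hc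
            simp only [hpre, Bool.false_eq_true, if_neg, not_false_iff]
            rw [ih f (c :: cur) acc (by simpa using hf)]
            cases h : pvSplitStar cs with
            | nil => exact absurd h (pvSplitStar_ne_nil cs)
            | cons p ps => simp [pvSplitStar, hc, h, List.append_assoc]

lemma pvSplitOnStar (l : List Char) : PySem.Chars.splitOn l ['*'] = pvSplitStar l := by
  rw [PySem.Chars.splitOn, pvSplitGo l (l.length + 1) [] [] (by omega)]
  cases h : pvSplitStar l with
  | nil => exact absurd h (pvSplitStar_ne_nil l)
  | cons p ps => simp

-- the interleaving `tmp[0] id[0] tmp[1] id[1] … tmp[-1]`, structurally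
def pvInter : List (List Char) → List String → List Char
  | [], _ => []
  | [p], _ => p
  | p :: q :: ps, ids => p ++ (ids.headD "").toList ++ pvInter (q :: ps) ids.tail

lemma pvInter_cons_append (x p : List Char) (ps : List (List Char)) (ids : List String) :
    pvInter ((x ++ p) :: ps) ids = x ++ pvInter (p :: ps) ids := by
  cases ps <;> simp [pvInter, List.append_assoc]

lemma pvSubst_eq_inter (l : List Char) : ∀ (ids : List String), l.count '*' ≤ ids.length →
    pvInter (pvSplitStar l) ids = pvSubstChars l ids := by
  induction l with
  | nil => intro ids _; simp [pvSplitStar, pvInter, pvSubstChars]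
  | cons c cs ih =>
      intro ids hlen
      by_cases hc : c = '*'
      · subst hc
        have hcount : cs.count '*' + 1 ≤ ids.length := by
          simpa [List.count_cons] using hlen
        cases ids with
        | nil => simp at hcount
        | cons i is =>
            cases h : pvSplitStar cs with
            | nil => exact absurd h (pvSplitStar_ne_nil cs)
            | cons p ps =>
                have hih : pvInter (p :: ps) is = pvSubstChars cs is := by
                  have := ih is (by simp at hcount; omega)
                  rwa [h] at this
                have hsplit : pvSplitStar ('*' :: cs) = [] :: p :: ps := by
                  simp [pvSplitStar, h]
                rw [hsplit]
                simp [pvInter, pvSubstChars, hih]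
      · have hcount : cs.count '*' ≤ ids.length := by
          simp [hc] at hlen ⊢; omega
        cases h : pvSplitStar cs with
        | nil => exact absurd h (pvSplitStar_ne_nil cs)
        | cons p ps =>
            have hih := ih ids hcount
            rw [h] at hih
            have : pvSplitStar (c :: cs) = (c :: p) :: ps := by
              simp [pvSplitStar, hc, h]
            rw [this]
            have hx : ((c :: p) : List Char) = [c] ++ p := rfl
            rw [hx, pvInter_cons_append]
            simp [pvSubstChars, hc, hih]

lemma pvGetD_succ (ids : List String) (i : Nat) :
    ids.getD (i + 1) "" = ids.tail.getD i "" := by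
  cases ids <;> simp

lemma pvFold_inter (tmp : List (List Char)) : ∀ (ids : List String) (a : List Char), tmp ≠ [] →
    ((List.range (tmp.length - 1)).foldl
      (fun acc i => acc ++ tmp.getD i [] ++ (ids.getD i "").toList) a) ++ tmp.getLastD [] =
    a ++ pvInter tmp ids := by
  induction tmp with
  | nil => intro _ _ h; exact absurd rfl h
  | cons p ps ih =>
      intro ids a _
      cases ps with
      | nil => simp [pvInter]
      | cons q qs =>
          have hlen : (p :: q :: qs).length - 1 = (q :: qs).length - 1 + 1 := by simp
          rw [hlen, List.range_succ_eq_map, List.foldl_cons, List.foldl_map]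
          have harg : (fun (acc : List Char) (i : Nat) =>
              acc ++ (p :: q :: qs).getD i.succ [] ++ (ids.getD i.succ "").toList) =
              (fun (acc : List Char) (i : Nat) =>
              acc ++ (q :: qs).getD i [] ++ (ids.tail.getD i "").toList) := by
            funext acc i
            rw [List.getD_cons_succ, pvGetD_succ]
          rw [harg]
          have hlast : (p :: q :: qs).getLastD [] = (q :: qs).getLastD [] := by
            simp [List.getLastD]
          rw [hlast, ih ids.tail (a ++ (p :: q :: qs).getD 0 [] ++ (ids.getD 0 "").toList)
            (by simp)]
          cases ids <;> simp [pvInter, List.append_assoc]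

lemma pvGetD_neg_one {α : Type} (xs : List α) (d : α) (h : xs ≠ []) :
    PySem.List.pyGetD xs (-1) d = xs.getLastD d := by
  have hn : 0 < xs.length := List.length_pos_iff.mpr h
  simp only [PySem.List.pyGetD, PySem.List.pyGet?, PySem.List.pyIdx?]
  have h1 : ¬ (0:Int) ≤ -1 := by omega
  have h2 : -(xs.length : Int) ≤ -1 := by omega
  simp only [h1, if_false, h2, if_true]
  have h3 : (-(-1:Int)).toNat = 1 := rfl
  rw [h3, List.getLastD_eq_getLast?, List.getLast?_eq_getElem?]
  simp

-- main equivalence on the non-trivial branch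
lemma pvMain (path : String) (ids : List String)
    (hne : path ≠ "") (hn : PySem.Str.count path "*" ≠ 0)
    (hlen : PySem.Str.count path "*" ≤ ids.length) :
    variadic_path_to_specific_path path ids = variadic_path_to_specific_path_alt path ids := by
  have hcount : PySem.Str.count path "*" = path.toList.count '*' := by
    rw [PySem.Str.count_eq]; exact pvCountStar path.toList
  have hsplit : PySem.Chars.splitOn path.toList ['*'] = pvSplitStar path.toList := pvSplitOnStar _
  have hlen' : (PySem.Chars.splitOn path.toList ['*']).length = PySem.Str.count path "*" + 1 := by
    rw [hsplit, pvSplitStar_length, hcount]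
  rw [variadic_path_to_specific_path, variadic_path_to_specific_path_alt]
  simp only [hne, ne_eq, not_false_iff, if_true, if_neg hn,
    ge_iff_le, if_pos hlen, if_neg (Nat.not_lt.mpr hlen), hlen']
  congr 1
  have htmp_ne : pvSplitStar path.toList ≠ [] := pvSplitStar_ne_nil _
  -- rewrite the pyRange fold into a Nat-range fold
  rw [PySem.List.pyRange_zero_natCast, List.foldl_map]
  have harg : (fun (acc : List Char) (k : Nat) =>
      acc ++ PySem.List.pyGetD (PySem.Chars.splitOn path.toList ['*']) (↑k) [] ++
        (PySem.List.pyGetD ids (↑k) "").toList) =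
      (fun (acc : List Char) (k : Nat) =>
      acc ++ (pvSplitStar path.toList).getD k [] ++ (ids.getD k "").toList) := by
    funext acc k
    rw [PySem.List.pyGetD_natCast, PySem.List.pyGetD_natCast, hsplit]
  rw [harg, hsplit, pvGetD_neg_one _ _ htmp_ne]
  have hrange : PySem.Str.count path "*" = (pvSplitStar path.toList).length - 1 := by
    rw [pvSplitStar_length, hcount]; omega
  rw [hrange, pvFold_inter _ ids [] htmp_ne, List.nil_append]
  congr 1
  exact pvSubst_eq_inter path.toList ids (by rw [← hcount]; exact hlen)

-- ===== VERDICT (by name: the statement is the Claim_ definition above) =====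
theorem variadic_path_to_specific_path_spec : Claim_equal_variadic_path_to_specific_path := by
  intro path ids _
  unfold Spec_variadic_path_to_specific_path
  by_cases hne : path = ""
  · subst hne
    simp [variadic_path_to_specific_path, variadic_path_to_specific_path_alt]
  · by_cases hn : PySem.Str.count path "*" = 0
    · have hn' : PySem.Chars.count path.toList ['*'] = 0 := hn
      simp [variadic_path_to_specific_path, variadic_path_to_specific_path_alt, hne, hn']
    · by_cases hlen : PySem.Str.count path "*" ≤ ids.length
      · exact pvMain path ids hne hn hlen
      · have hn' : ¬ PySem.Chars.count path.toList ['*'] = 0 := hn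
        have hlen' : ids.length < PySem.Chars.count path.toList ['*'] :=
          Nat.lt_of_not_le (fun h => hlen h)
        simp [variadic_path_to_specific_path, variadic_path_to_specific_path_alt, hne, hn',
          hlen', Nat.not_le.mpr hlen']
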